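-- pv_equiv track=rewrite | github.com/AdamZhouSE/pythonHomework | Code/CodeRecords/2711/60601/235352.py | solve
-- ===== SOURCE A (Python) =====
-- def isSame(str1:str,str2:str):
--     if str1==str2:
--         return True
--     for i in range(len(str1)):
--         for j in range(i+1,len(str1)):
--             s = list(str1)
--             temp = s[i]
--             s[i] = s[j]
--             s[j] = temp#交换两个位置的字符
--             if s == list(str2):
--                 return True
--     return False
--
-- def solve(list:list):
--     re = [] #列表的列表
--     re.append([list[0]])
--     for i in list:
--         logo = False
--         for j in range(len(re)):
--             for k in range(len(re[j])):
--                 if isSame(i,re[j][k]):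
--                     logo = True
--                     if i!=re[j][k]:
--                         re[j].append(i)
--
--         if logo == False:
--             re.append([i])
--     return len(re)
-- ===== SOURCE B (Python) =====
-- def isSame(str1: str, str2: str):
--     if str1 == str2:
--         return True
--     for i in range(len(str1)):
--         for j in range(i + 1, len(str1)):
--             s = list(str1)
--             temp = s[i]
--             s[i] = s[j]
--             s[j] = temp
--             if s == list(str2):
--                 return True
--     return False
--
-- def solve(list: list):
--     # Count strings not isSame-matching any earlier string; no group lists kept.
--     count = 0
--     seen = []
--     for s in list:
--         if not any(isSame(s, t) for t in seen):
--             count += 1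
--         seen.append(s)
--     return count
-- ===== Notes on version B (the rewrite author's own statement) =====
-- stated objective: simpler
-- what changed: B drops A's list-of-groups bookkeeping (with its multi-group re-appends) and keeps only an integer counter plus the list of already-seen strings: a string starts a new group exactly when it is isSame to no earlier string.
-- crash fix: On the empty list A raises IndexError (list[0]); B naturally returns 0. — e.g. on solve([]): A raises IndexError, B returns 0
import Mathlib
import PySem

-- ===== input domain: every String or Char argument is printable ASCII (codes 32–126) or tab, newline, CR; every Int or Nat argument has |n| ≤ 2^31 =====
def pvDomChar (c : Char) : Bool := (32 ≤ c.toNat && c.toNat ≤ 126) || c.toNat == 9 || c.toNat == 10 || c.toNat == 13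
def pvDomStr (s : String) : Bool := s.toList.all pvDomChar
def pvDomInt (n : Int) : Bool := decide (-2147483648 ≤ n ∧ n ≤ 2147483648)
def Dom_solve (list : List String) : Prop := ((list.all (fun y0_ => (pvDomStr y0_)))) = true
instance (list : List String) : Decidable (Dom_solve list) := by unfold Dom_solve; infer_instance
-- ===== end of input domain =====

-- B keeps only a counter and the seen prefix instead of A's list of groups; on [] A raises IndexError, B returns 0 (see Raises_solve). Return-value equivalence only.

-- ===== PORT A =====
-- shared helper: both Source A and Source B define this identical isSame
def isSame (str1 str2 : String) : Bool :=
  if str1 == str2 then true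
  else
    let a := str1.toList
    let b := str2.toList
    (List.range a.length).any (fun i =>
      (List.range' (i+1) (a.length - (i+1))).any (fun j =>
        let s := (a.set i (a.getD j ' ')).set j (a.getD i ' ')
        s == b))

-- the k-loop over group re[j]: appends copies of i at the end, sets logo on any match
def stepGroup (i : String) (g : List String) : List String × Bool :=
  let st := g.foldl (fun (st : List String × Bool) m =>
    if isSame i m then
      (if i == m then (st.1, true) else (st.1 ++ [i], true))
    else st) ([], false)
  (g ++ st.1, st.2)

-- one iteration of A's outer loop: j-loop over all groups, then maybe a new group
def stepRe (re : List (List String)) (i : String) : List (List String) :=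
  let rs := re.map (stepGroup i)
  let logo := rs.any (fun r => r.2)
  if logo then rs.map (fun r => r.1) else rs.map (fun r => r.1) ++ [[i]]

def solve (list : List String) : Int :=
  match list with
  | [] => 0  -- Python raises IndexError (list[0]) here; excluded by Pre_solve
  | x :: _ => ((list.foldl stepRe [[x]]).length : Int)

-- ===== PORT B =====
def solve_alt (list : List String) : Int :=
  (list.foldl (fun (st : Int × List String) s =>
    (if st.2.any (fun t => isSame s t) then st.1 else st.1 + 1, st.2 ++ [s]))
    ((0 : Int), ([] : List String))).1

-- ===== PRECONDITION & SPEC =====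
-- Pre_ excludes only the empty list, on which A raises IndexError at list[0]
def Pre_solve (list : List String) : Prop := list ≠ []
instance (list : List String) : Decidable (Pre_solve list) := by unfold Pre_solve; infer_instance
def pvWitness_solve : List String := ["ab", "ba", "cd"]

-- On the empty list A raises IndexError (list[0]); B naturally returns 0.
def Raises_solve (list : List String) : Prop := list = []
instance (list : List String) : Decidable (Raises_solve list) := by unfold Raises_solve; infer_instance
def pvRaiseWitness_solve : List String := []
def pvRaiseWitnessOut_solve : Int := 0

def Spec_solve (list : List String) (out : Int) : Prop := out = solve_alt list
instance (list : List String) (out : Int) : Decidable (Spec_solve list out) := by unfold Spec_solve; infer_instance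

-- ===== CLAIM (what is proved, stated in full; the proofs are below) =====
def Claim_equal_solve : Prop := ∀ (list : List String), Dom_solve list → Pre_solve list → Spec_solve list (solve list)
def Claim_raises_solve : Prop := (∀ (list : List String), Dom_solve list → Raises_solve list → ¬ Pre_solve list) ∧ (Dom_solve (pvRaiseWitness_solve) ∧ Raises_solve (pvRaiseWitness_solve) ∧ solve_alt (pvRaiseWitness_solve) = pvRaiseWitnessOut_solve)

-- ===== LEMMAS AND PROOFS =====

-- characterisation of the k-loop accumulator
theorem stepGroup_fold_char (i : String) (g : List String) (acc : List String) (b : Bool) :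
    g.foldl (fun (st : List String × Bool) m =>
      if isSame i m then
        (if i == m then (st.1, true) else (st.1 ++ [i], true))
      else st) (acc, b)
    = (acc ++ (g.filter (fun m => isSame i m && !(i == m))).map (fun _ => i),
       b || g.any (fun m => isSame i m)) := by
  induction g generalizing acc b with
  | nil => simp
  | cons m g ih =>
    rw [List.foldl_cons]
    by_cases h1 : isSame i m
    · by_cases h2 : i == m
      · have hstep : (if isSame i m = true then
            if (i == m) = true then ((acc, b).1, true) else ((acc, b).1 ++ [i], true)
          else (acc, b)) = ((acc : List String), true) := by simp [h1, h2]
        rw [hstep, ih]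
        simp [List.any_cons, h1, h2]
      · have hstep : (if isSame i m = true then
            if (i == m) = true then ((acc, b).1, true) else ((acc, b).1 ++ [i], true)
          else (acc, b)) = (acc ++ [i], true) := by simp [h1, h2]
        rw [hstep, ih]
        simp [List.any_cons, h1, h2]
    · have hstep : (if isSame i m = true then
            if (i == m) = true then ((acc, b).1, true) else ((acc, b).1 ++ [i], true)
          else (acc, b)) = (acc, b) := by simp [h1]
      rw [hstep, ih]
      simp [List.any_cons, h1]

theorem stepGroup_eq (i : String) (g : List String) :
    stepGroup i g = (g ++ (g.filter (fun m => isSame i m && !(i == m))).map (fun _ => i),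
      g.any (fun m => isSame i m)) := by
  simp only [stepGroup]
  rw [stepGroup_fold_char]
  simp

theorem mem_stepGroup_fst (i v : String) (g : List String) :
    v ∈ (stepGroup i g).1 ↔ v ∈ g ∨ (v = i ∧ ∃ m ∈ g, isSame i m = true) := by
  rw [stepGroup_eq]
  simp only [List.mem_append, List.mem_map, List.mem_filter]
  constructor
  · rintro (h | ⟨m, ⟨hm, hf⟩, rfl⟩)
    · exact Or.inl h
    · exact Or.inr ⟨rfl, m, hm, by simpa using (Bool.and_eq_true _ _ ▸ hf).1⟩
  · rintro (h | ⟨rfl, m, hm, hs⟩)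
    · exact Or.inl h
    · by_cases he : (v == m)
      · exact Or.inl (by rw [show v = m from beq_iff_eq.mp he]; exact hm)
      · exact Or.inr ⟨m, ⟨hm, by simp [hs, he]⟩, rfl⟩

-- any over the mapped groups = a match somewhere in the flattened re
theorem logo_iff (i : String) (re : List (List String)) :
    ((re.map (stepGroup i)).any (fun r => r.2) = true) ↔ ∃ m ∈ re.flatten, isSame i m = true := by
  rw [List.any_map]
  simp only [Function.comp_def, stepGroup_eq, List.any_eq_true, List.mem_flatten]
  constructor
  · rintro ⟨g, hg, m, hm, hs⟩
    exact ⟨m, ⟨g, hg, hm⟩, hs⟩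
  · rintro ⟨m, ⟨g, hg, hm⟩, hs⟩
    exact ⟨g, hg, m, hm, hs⟩

theorem mem_flatten_stepRe (i v : String) (re : List (List String)) :
    v ∈ (stepRe re i).flatten ↔ v ∈ re.flatten ∨ v = i := by
  have hmapped : ∀ w : String, (w ∈ ((re.map (stepGroup i)).map (fun r => r.1)).flatten ↔
      w ∈ re.flatten ∨ (w = i ∧ ∃ m ∈ re.flatten, isSame i m = true)) := by
    intro w
    simp only [List.map_map, Function.comp_def, List.mem_flatten, List.mem_map]
    constructor
    · rintro ⟨l, ⟨g, hg, rfl⟩, hw⟩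
      rcases (mem_stepGroup_fst i w g).mp hw with h | ⟨rfl, m, hm, hs⟩
      · exact Or.inl ⟨g, hg, h⟩
      · exact Or.inr ⟨rfl, m, ⟨g, hg, hm⟩, hs⟩
    · rintro (⟨g, hg, hw⟩ | ⟨hwi, m, ⟨g, hg, hm⟩, hs⟩)
      · exact ⟨_, ⟨g, hg, rfl⟩, (mem_stepGroup_fst i w g).mpr (Or.inl hw)⟩
      · exact ⟨_, ⟨g, hg, rfl⟩, (mem_stepGroup_fst i w g).mpr (Or.inr ⟨hwi, m, hm, hs⟩)⟩
  unfold stepRe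
  by_cases hl : (re.map (stepGroup i)).any (fun r => r.2) = true
  · have hex := (logo_iff i re).mp hl
    rw [if_pos hl]
    rw [hmapped v]
    constructor
    · rintro (h | ⟨rfl, _⟩); exacts [Or.inl h, Or.inr rfl]
    · rintro (h | rfl); exacts [Or.inl h, Or.inr ⟨rfl, hex⟩]
  · rw [if_neg hl]
    rw [List.flatten_append, List.mem_append, hmapped v]
    constructor
    · rintro ((h | ⟨rfl, _⟩) | h)
      exacts [Or.inl h, Or.inr rfl, Or.inr (by simpa using h)]
    · rintro (h | rfl)
      exacts [Or.inl (Or.inl h), Or.inr (by simp)]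

theorem length_stepRe (i : String) (re : List (List String)) :
    (stepRe re i).length =
      re.length + (if ∃ m ∈ re.flatten, isSame i m = true then 0 else 1) := by
  unfold stepRe
  by_cases hl : (re.map (stepGroup i)).any (fun r => r.2) = true
  · rw [if_pos ((logo_iff i re).mp hl), if_pos hl]
    simp
  · rw [if_neg (fun hex => hl ((logo_iff i re).mpr hex)), if_neg hl]
    simp

-- main invariant: lengths evolve like B's counter when flatten(re) and seen match as sets
theorem main_inv (t : List String) :
    ∀ (re : List (List String)) (seen : List String) (c : Int),
      (∀ v, v ∈ re.flatten ↔ v ∈ seen) → (re.length : Int) = c →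
      ((t.foldl stepRe re).length : Int) =
        (t.foldl (fun (st : Int × List String) s =>
          (if st.2.any (fun u => isSame s u) then st.1 else st.1 + 1, st.2 ++ [s])) (c, seen)).1 := by
  induction t with
  | nil => intro re seen c hmem hlen; simpa using hlen
  | cons i t ih =>
    intro re seen c hmem hlen
    simp only [List.foldl_cons]
    have hmatch : (∃ m ∈ re.flatten, isSame i m = true) ↔ (seen.any (fun u => isSame i u) = true) := by
      simp only [List.any_eq_true]
      exact ⟨fun ⟨m, hm, hs⟩ => ⟨m, (hmem m).mp hm, hs⟩,
             fun ⟨m, hm, hs⟩ => ⟨m, (hmem m).mpr hm, hs⟩⟩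
    apply ih
    · intro v
      rw [mem_flatten_stepRe, hmem v]
      simp [List.mem_append]
    · rw [length_stepRe]
      by_cases h : ∃ m ∈ re.flatten, isSame i m = true
      · rw [if_pos h, if_pos (hmatch.mp h)]
        simpa using hlen
      · rw [if_neg h, if_neg (fun ha => h (hmatch.mpr ha))]
        push_cast
        omega

theorem isSame_self (s : String) : isSame s s = true := by
  simp [isSame]

-- ===== VERDICT (by name: the statement is the Claim_ definition above) =====
theorem solve_raises : Claim_raises_solve := by
  unfold Claim_raises_solve
  constructor
  · intro l _ hr
    unfold Raises_solve at hr
    unfold Pre_solve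
    simp [hr]
  · exact ⟨by decide, by decide, by decide⟩

theorem solve_spec : Claim_equal_solve := by
  intro list hdom hpre
  unfold Spec_solve
  match list with
  | [] => exact absurd hpre (solve_raises.1 [] hdom rfl)
  | x :: t =>
    unfold solve solve_alt
    simp only [List.foldl_cons]
    have hfirstA : stepRe [[x]] x = [[x]] := by
      simp [stepRe, stepGroup_eq, isSame_self]
    rw [hfirstA]
    have hfirstB : (if ([] : List String).any (fun u => isSame x u) then (0:Int) else 0 + 1,
        ([] : List String) ++ [x]) = ((1 : Int), [x]) := by simp
    rw [hfirstB]
    exact main_inv t [[x]] [x] 1 (by simp) (by simp)
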